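-- pv_equiv track=rewrite | github.com/jamestkpoon/aoc2020 | 6.py | split_input_into_groups
-- ===== SOURCE A (Python) =====
-- def split_input_into_groups(s):
--     chunks_ = []
--     chunk_ = []
--
--     for l in s:
--         if len(l) != 0: chunk_.append(l)
--         elif len(chunk_) != 0:
--             chunks_.append(chunk_)
--             chunk_ = []
--
--     if len(chunk_) != 0: chunks_.append(chunk_)
--
--     return chunks_
-- ===== SOURCE B (Python) =====
-- def split_input_into_groups(s):
--     # Recursive run-splitting: skip blanks, slice off the maximal run of
--     # non-empty lines, recurse on the remainder.
--     if not s: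
--         return []
--     if len(s[0]) == 0:
--         return split_input_into_groups(s[1:])
--     k = 1
--     while k < len(s) and len(s[k]) != 0:
--         k += 1
--     return [s[:k]] + split_input_into_groups(s[k:])
-- ===== Notes on version B (the rewrite author's own statement) =====
-- stated objective: alternative
-- what changed: Replaced A's single pass with a chunk/chunks accumulator pair by a recursive decomposition that skips blank lines and slices off whole maximal runs of non-empty lines.
import Mathlib
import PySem

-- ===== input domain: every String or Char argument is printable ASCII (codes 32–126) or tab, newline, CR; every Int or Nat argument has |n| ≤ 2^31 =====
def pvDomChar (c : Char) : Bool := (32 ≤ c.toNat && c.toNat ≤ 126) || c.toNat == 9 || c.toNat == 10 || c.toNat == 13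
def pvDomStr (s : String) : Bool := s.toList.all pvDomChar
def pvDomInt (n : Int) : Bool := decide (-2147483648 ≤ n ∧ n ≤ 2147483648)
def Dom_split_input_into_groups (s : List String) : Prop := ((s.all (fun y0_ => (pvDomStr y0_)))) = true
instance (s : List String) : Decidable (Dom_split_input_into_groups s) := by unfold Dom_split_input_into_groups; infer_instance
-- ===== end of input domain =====

-- B replaces A's accumulator pass by a recursive maximal-run decomposition (alternative structure, same cost).

-- ===== PORT A =====
-- one loop step of A: state = (chunks_, chunk_)
def pvStepA (acc : List (List String) × List String) (l : String) :
    List (List String) × List String :=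
  if PySem.Str.len l ≠ 0 then (acc.1, acc.2 ++ [l])
  else if acc.2.length ≠ 0 then (acc.1 ++ [acc.2], ([] : List String))
  else acc

def split_input_into_groups (s : List String) : List (List String) :=
  let st := s.foldl pvStepA (([] : List (List String)), ([] : List String))
  if st.2.length ≠ 0 then st.1 ++ [st.2] else st.1

-- ===== PORT B =====
-- recursion of Source B: `k` counts the maximal nonempty prefix of the tail, so
-- s[:k] = head :: takeWhile nonempty tail and s[k:] = dropWhile nonempty tail
def split_input_into_groups_alt : List String → List (List String)
  | [] => []
  | l :: rest =>
    if PySem.Str.len l = 0 then split_input_into_groups_alt rest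
    else (l :: rest.takeWhile (fun x => PySem.Str.len x ≠ 0)) ::
         split_input_into_groups_alt (rest.dropWhile (fun x => PySem.Str.len x ≠ 0))
termination_by s => s.length
decreasing_by
  · simp
  · have := List.length_dropWhile_le (fun x => decide (PySem.Str.len x ≠ 0)) rest
    simp at this ⊢; omega

-- ===== PRECONDITION & SPEC =====
def Spec_split_input_into_groups (s : List String) (out : List (List String)) : Prop := out = split_input_into_groups_alt s
instance (s : List String) (out : List (List String)) : Decidable (Spec_split_input_into_groups s out) := by unfold Spec_split_input_into_groups; infer_instance

-- ===== CLAIM (what is proved, stated in full; the proofs are below) =====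
def Claim_equal_split_input_into_groups : Prop := ∀ (s : List String), Dom_split_input_into_groups s → Spec_split_input_into_groups s (split_input_into_groups s)

-- ===== LEMMAS AND PROOFS =====

def pvFinish (st : List (List String) × List String) : List (List String) :=
  if st.2.length ≠ 0 then st.1 ++ [st.2] else st.1

theorem pvFinish_shift (s : List String) (cs : List (List String)) (c : List String) :
    pvFinish (s.foldl pvStepA (cs, c)) = cs ++ pvFinish (s.foldl pvStepA ([], c)) := by
  induction s generalizing cs c with
  | nil =>
    by_cases h : c.length = 0
    · simp only [List.foldl_nil, pvFinish, if_neg (by omega : ¬ c.length ≠ 0)]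
      simp
    · simp only [List.foldl_nil, pvFinish, if_pos h]
      simp
  | cons l rest ih =>
    simp only [List.foldl_cons, pvStepA]
    split
    · rw [ih cs, ih []]
    · split
      · simp only [List.nil_append]
        rw [ih (cs ++ [c]), ih [c]]
        simp
      · rw [ih cs, ih []]

theorem pvAlt_nil : split_input_into_groups_alt [] = [] := by
  rw [split_input_into_groups_alt]

theorem pvAlt_cons_zero (l : String) (rest : List String) (hl : PySem.Str.len l = 0) :
    split_input_into_groups_alt (l :: rest) = split_input_into_groups_alt rest := by
  rw [split_input_into_groups_alt, if_pos hl]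

theorem pvAlt_cons_ne (l : String) (rest : List String) (hl : ¬ PySem.Str.len l = 0) :
    split_input_into_groups_alt (l :: rest) =
      (l :: rest.takeWhile (fun x => PySem.Str.len x ≠ 0)) ::
        split_input_into_groups_alt (rest.dropWhile (fun x => PySem.Str.len x ≠ 0)) := by
  rw [split_input_into_groups_alt]
  simp only [hl, if_false]

theorem pvFinish_main (s : List String) (c : List String) :
    pvFinish (s.foldl pvStepA ([], c)) =
      if c.length = 0 then split_input_into_groups_alt s
      else (c ++ s.takeWhile (fun x => PySem.Str.len x ≠ 0)) ::
           split_input_into_groups_alt (s.dropWhile (fun x => PySem.Str.len x ≠ 0)) := by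
  induction s generalizing c with
  | nil =>
    by_cases hc : c.length = 0
    · have hc' : c = [] := List.eq_nil_of_length_eq_zero hc
      subst hc'
      simp [pvFinish, pvAlt_nil]
    · simp [pvFinish, hc, pvAlt_nil]
  | cons l rest ih =>
    simp only [List.foldl_cons, pvStepA]
    by_cases hl : PySem.Str.len l = 0
    · rw [if_neg (not_not_intro hl)]
      by_cases hc : c.length = 0
      · have hc' : c = [] := List.eq_nil_of_length_eq_zero hc
        subst hc'
        rw [if_neg (by simp), ih]
        simp only [List.length_nil]
        rw [if_pos trivial, if_pos trivial, pvAlt_cons_zero l rest hl]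
      · rw [if_pos hc, pvFinish_shift, ih]
        simp only [List.length_nil]
        rw [if_pos trivial, if_neg hc]
        simp only [List.takeWhile_cons, List.dropWhile_cons, hl]
        simp [pvAlt_cons_zero l rest hl]
    · rw [if_pos hl, ih, if_neg (by simp)]
      by_cases hc : c.length = 0
      · have hc' : c = [] := List.eq_nil_of_length_eq_zero hc
        subst hc'
        simp only [List.length_nil]
        rw [if_pos trivial, pvAlt_cons_ne l rest hl]
        simp
      · rw [if_neg hc]
        have hl' : ¬ l = "" := by simpa using hl
        simp only [List.takeWhile_cons, List.dropWhile_cons]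
        simp [hl']

theorem split_input_into_groups_eq (s : List String) :
    split_input_into_groups s = split_input_into_groups_alt s := by
  have := pvFinish_main s []
  simpa [pvFinish, split_input_into_groups] using this

-- ===== VERDICT (by name: the statement is the Claim_ definition above) =====
theorem split_input_into_groups_spec : Claim_equal_split_input_into_groups := by
  intro s _
  exact split_input_into_groups_eq s
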